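-- pv_equiv track=rewrite | github.com/benaka17/WorkoutTracker | app.py | workout_details
-- ===== SOURCE A (Python) =====
-- def workout_details(workout):
--     exercise_details = {}
--
--     if workout == "Shoulders and Triceps":
--         exercises = ["Shoulder Press", "Lateral Raises", "Rear Delt Fly", "Tricep Pushdown", "Tricep Extensions"]
--         sets = [4, 4, 3, 4, 4]
--     elif workout == "Back":
--         exercises = ["Pull Ups", "Close Grip Rows", "Pulldowns", "Single Arm Machine Row"]
--         sets = [3, 4, 3, 3]
--     elif workout == "Chest and Biceps":
--         exercises = ["Flat Bench Press", "Incline Bench Press", "Pec Fly", "Hammer Curls", "Barbell Curls"]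
--         sets = [3, 3, 3, 3, 3]
--     elif workout == "Legs and Abs":
--         exercises = ["Leg Extensions", "Squats", "Deadlifts", "Machine Crunches", "Plank"]
--         sets = [2, 4, 3, 3, 2]
--     else:
--         # Default if workout is not recognized
--         exercises = []
--         sets = []
--
--     # Construct the exercise_details dictionary
--     for i in range(len(exercises)):
--         exercise_details[exercises[i]] = sets[i]
--
--     return exercise_details
-- ===== SOURCE B (Python) =====
-- # The plan data as a flat relational table of (workout, exercise, sets) rows;
-- # the result is built by a single filtering pass over the rows (no branching,
-- # no parallel lists, no per-workout dicts).
-- _ROWS = [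
--     ("Shoulders and Triceps", "Shoulder Press", 4),
--     ("Shoulders and Triceps", "Lateral Raises", 4),
--     ("Shoulders and Triceps", "Rear Delt Fly", 3),
--     ("Shoulders and Triceps", "Tricep Pushdown", 4),
--     ("Shoulders and Triceps", "Tricep Extensions", 4),
--     ("Back", "Pull Ups", 3),
--     ("Back", "Close Grip Rows", 4),
--     ("Back", "Pulldowns", 3),
--     ("Back", "Single Arm Machine Row", 3),
--     ("Chest and Biceps", "Flat Bench Press", 3),
--     ("Chest and Biceps", "Incline Bench Press", 3),
--     ("Chest and Biceps", "Pec Fly", 3),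
--     ("Chest and Biceps", "Hammer Curls", 3),
--     ("Chest and Biceps", "Barbell Curls", 3),
--     ("Legs and Abs", "Leg Extensions", 2),
--     ("Legs and Abs", "Squats", 4),
--     ("Legs and Abs", "Deadlifts", 3),
--     ("Legs and Abs", "Machine Crunches", 3),
--     ("Legs and Abs", "Plank", 2),
-- ]
--
-- def workout_details(workout):
--     return {exercise: sets for (w, exercise, sets) in _ROWS if w == workout}
-- ===== Notes on version B (the rewrite author's own statement) =====
-- stated objective: alternative
-- what changed: Replaced the if/elif chain with parallel exercise/sets lists and an index loop by a flat relational table of (workout, exercise, sets) rows and a single filtering dict comprehension over it.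
import Mathlib
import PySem

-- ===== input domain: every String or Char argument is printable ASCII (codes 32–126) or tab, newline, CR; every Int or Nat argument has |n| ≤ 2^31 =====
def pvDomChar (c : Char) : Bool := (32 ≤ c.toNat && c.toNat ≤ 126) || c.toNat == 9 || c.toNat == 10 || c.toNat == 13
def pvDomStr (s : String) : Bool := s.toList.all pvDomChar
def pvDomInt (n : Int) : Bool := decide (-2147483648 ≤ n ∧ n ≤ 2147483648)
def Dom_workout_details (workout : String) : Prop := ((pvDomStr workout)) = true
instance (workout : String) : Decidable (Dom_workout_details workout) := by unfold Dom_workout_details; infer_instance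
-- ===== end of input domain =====

-- ===== PORT A =====
-- B replaces the if/elif chain + parallel-list index loop with one filtering pass over a flat row table.
def workout_details (workout : String) : List (String × Int) :=
  let p : List String × List Int :=
    if workout == "Shoulders and Triceps" then
      (["Shoulder Press", "Lateral Raises", "Rear Delt Fly", "Tricep Pushdown", "Tricep Extensions"],
       [4, 4, 3, 4, 4])
    else if workout == "Back" then
      (["Pull Ups", "Close Grip Rows", "Pulldowns", "Single Arm Machine Row"], [3, 4, 3, 3])
    else if workout == "Chest and Biceps" then
      (["Flat Bench Press", "Incline Bench Press", "Pec Fly", "Hammer Curls", "Barbell Curls"],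
       [3, 3, 3, 3, 3])
    else if workout == "Legs and Abs" then
      (["Leg Extensions", "Squats", "Deadlifts", "Machine Crunches", "Plank"], [2, 4, 3, 3, 2])
    else ([], [])
  let exercises := p.1
  let sets := p.2
  -- for i in range(len(exercises)): exercise_details[exercises[i]] = sets[i]
  ((PySem.List.pyRange 0 (exercises.length : Int) 1).foldl
      (fun (d : PySem.Dict String Int) i =>
        d.insert (PySem.List.pyGetD exercises i "") (PySem.List.pyGetD sets i 0))
      PySem.Dict.empty).items

-- ===== PORT B =====
-- Flat relational table of (workout, exercise, sets) rows.
def pvRows : List (String × String × Int) :=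
  [("Shoulders and Triceps", "Shoulder Press", 4),
   ("Shoulders and Triceps", "Lateral Raises", 4),
   ("Shoulders and Triceps", "Rear Delt Fly", 3),
   ("Shoulders and Triceps", "Tricep Pushdown", 4),
   ("Shoulders and Triceps", "Tricep Extensions", 4),
   ("Back", "Pull Ups", 3),
   ("Back", "Close Grip Rows", 4),
   ("Back", "Pulldowns", 3),
   ("Back", "Single Arm Machine Row", 3),
   ("Chest and Biceps", "Flat Bench Press", 3),
   ("Chest and Biceps", "Incline Bench Press", 3),
   ("Chest and Biceps", "Pec Fly", 3),
   ("Chest and Biceps", "Hammer Curls", 3),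
   ("Chest and Biceps", "Barbell Curls", 3),
   ("Legs and Abs", "Leg Extensions", 2),
   ("Legs and Abs", "Squats", 4),
   ("Legs and Abs", "Deadlifts", 3),
   ("Legs and Abs", "Machine Crunches", 3),
   ("Legs and Abs", "Plank", 2)]

-- dict comprehension {exercise: sets for (w, exercise, sets) in _ROWS if w == workout}
def workout_details_alt (workout : String) : List (String × Int) :=
  (pvRows.foldl
      (fun (d : PySem.Dict String Int) r =>
        if r.1 == workout then d.insert r.2.1 r.2.2 else d)
      PySem.Dict.empty).items

-- ===== PRECONDITION & SPEC =====
def Spec_workout_details (workout : String) (out : List (String × Int)) : Prop := out = workout_details_alt workout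
instance (workout : String) (out : List (String × Int)) : Decidable (Spec_workout_details workout out) := by unfold Spec_workout_details; infer_instance

-- ===== CLAIM =====
def Claim_equal_workout_details : Prop := ∀ (workout : String), Dom_workout_details workout → Spec_workout_details workout (workout_details workout)

-- ===== LEMMAS AND PROOFS =====

-- ===== VERDICT =====
theorem workout_details_spec : Claim_equal_workout_details := by
  intro workout _
  unfold Spec_workout_details workout_details workout_details_alt pvRows
  by_cases h1 : workout = "Shoulders and Triceps"
  · subst h1; decide
  · by_cases h2 : workout = "Back"
    · subst h2; decide
    · by_cases h3 : workout = "Chest and Biceps"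
      · subst h3; decide
      · by_cases h4 : workout = "Legs and Abs"
        · subst h4; decide
        · simp [h1, h2, h3, h4, Ne.symm h1, Ne.symm h2, Ne.symm h3, Ne.symm h4,
                PySem.List.pyRange, PySem.Dict.empty, List.foldl]
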